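-- pv_equiv track=rewrite | github.com/yorak/VeRyPy | verypy/util.py | routes2sol
-- ===== SOURCE A (Python) =====
-- def routes2sol(routes):
--     """Concatenates a list of routes to a solution. Routes may or may not have
--     visits to the depot (node 0), but the procedure will make sure that
--     the solution leaves from the depot, returns to the depot, and that the
--     routes are separated by a visit to the depot."""
--     if not routes:
--         return None
--
--     sol = [0]
--     for r in routes:
--         if r:
--             if r[0]==0:
--                 sol += r[1:]
--             else:
--                 sol += r
--             if sol[-1]!=0:
--                 sol += [0]
--     return sol
-- ===== SOURCE B (Python) =====
-- def routes2sol(routes):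
--     """Concatenates a list of routes to a solution. Routes may or may not have
--     visits to the depot (node 0), but the procedure will make sure that
--     the solution leaves from the depot, returns to the depot, and that the
--     routes are separated by a visit to the depot."""
--     if not routes:
--         return None
--
--     # Build the solution back-to-front: walk the routes in reverse, keeping
--     # the (reversed) tail of the solution; the leading depot is appended last.
--     out = []
--     for r in reversed(routes):
--         rr = r[::-1]
--         if rr and rr[-1] == 0:   # route had a leading depot visit: drop it
--             rr = rr[:-1]
--         if rr:
--             if rr[0] != 0:       # route did not end at the depot: return to it
--                 out.append(0)
--             out += rr
--     out.append(0)                # the solution leaves from the depot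
--     out.reverse()
--     return out
-- ===== Notes on version B (the rewrite author's own statement) =====
-- stated objective: alternative
-- what changed: Builds the solution back-to-front: iterates the routes in reverse over reversed routes, dropping the forward-leading depot from the end of the reversed route and prepending a return-to-depot when the route does not end at 0, then appends the starting depot and reverses once; A instead grows the solution forward and inspects its running last element.
import Mathlib
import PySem

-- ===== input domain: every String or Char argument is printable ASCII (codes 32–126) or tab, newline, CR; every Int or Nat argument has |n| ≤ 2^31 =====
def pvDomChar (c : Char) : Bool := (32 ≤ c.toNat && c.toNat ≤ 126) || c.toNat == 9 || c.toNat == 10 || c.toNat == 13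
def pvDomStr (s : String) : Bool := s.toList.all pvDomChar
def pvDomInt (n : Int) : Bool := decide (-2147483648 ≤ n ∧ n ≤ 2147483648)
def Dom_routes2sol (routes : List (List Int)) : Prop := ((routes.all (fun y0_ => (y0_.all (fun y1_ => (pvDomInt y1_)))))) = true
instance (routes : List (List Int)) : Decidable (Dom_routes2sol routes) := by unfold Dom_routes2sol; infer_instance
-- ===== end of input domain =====

-- B builds the solution back-to-front over the reversed routes instead of A's forward loop
-- that inspects the running solution's last element (alternative decomposition, same cost).

-- ===== PORT A =====
-- A's loop body as a fold step over the running solution `sol`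
def pvStepA (sol : List Int) (r : List Int) : List Int :=
  if r ≠ [] then
    let sol1 := sol ++ (if PySem.List.pyGet? r 0 = some 0 then PySem.List.slice r (some 1) none else r)
    if PySem.List.pyGet? sol1 (-1) ≠ some 0 then sol1 ++ [0] else sol1
  else sol

def routes2sol (routes : List (List Int)) : Option (List Int) :=
  if routes = [] then none
  else some (routes.foldl pvStepA [0])

-- ===== PORT B =====
-- B's loop body: `out` is the reversed tail of the solution, `r` the current route
def pvStepB (out : List Int) (r : List Int) : List Int :=
  let rr := (PySem.List.slice? r none none (-1)).getD []   -- r[::-1]; step -1 never raises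
  let rr := if rr ≠ [] ∧ PySem.List.pyGet? rr (-1) = some 0
            then PySem.List.slice rr none (some (-1)) else rr
  if rr ≠ [] then
    (if PySem.List.pyGet? rr 0 ≠ some 0 then out ++ [0] else out) ++ rr
  else out

def routes2sol_alt (routes : List (List Int)) : Option (List Int) :=
  if routes = [] then none
  else some (((routes.reverse.foldl pvStepB []) ++ [0]).reverse)

-- ===== PRECONDITION & SPEC =====
def Spec_routes2sol (routes : List (List Int)) (out : Option (List Int)) : Prop := out = routes2sol_alt routes
instance (routes : List (List Int)) (out : Option (List Int)) : Decidable (Spec_routes2sol routes out) := by unfold Spec_routes2sol; infer_instance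

-- ===== CLAIM (what is proved, stated in full; the proofs are below) =====
def Claim_equal_routes2sol : Prop := ∀ (routes : List (List Int)), Dom_routes2sol routes → Spec_routes2sol routes (routes2sol routes)

-- ===== LEMMAS AND PROOFS =====

-- proof-side normal form: the segment each route contributes to the solution's tail
def pvSeg (r : List Int) : List Int :=
  if r = [] then []
  else
    let body := if r.head? = some 0 then r.tail else r
    if body = [] then [] else if body.getLast? = some 0 then body else body ++ [0]

-- l[0]? is the head
theorem pvGetZero (l : List Int) : l[0]? = l.head? := by cases l <;> simp

-- each segment is empty or ends with 0
theorem pvSeg_last (r : List Int) : pvSeg r = [] ∨ (pvSeg r).getLast? = some 0 := by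
  unfold pvSeg
  by_cases hr : r = []
  · simp [hr]
  · simp only [hr, if_false]
    set body := if r.head? = some 0 then r.tail else r with hbody
    by_cases hb : body = []
    · simp [hb]
    · by_cases h0 : body.getLast? = some 0
      · right; simp [hb, h0]
      · right; simp [hb, h0]

-- A's step on a solution ending in 0 appends exactly the segment
theorem pvStepA_eq (sol r : List Int) (h : sol.getLast? = some 0) :
    pvStepA sol r = sol ++ pvSeg r := by
  unfold pvStepA pvSeg
  by_cases hr : r = []
  · simp [hr]
  · have hget : PySem.List.pyGet? r 0 = r.head? := by
      rw [PySem.List.pyGet?_zero]; exact pvGetZero r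
    simp only [hr, if_false, ne_eq, not_false_eq_true, if_true, hget,
      PySem.List.slice_from_one]
    set body := if r.head? = some 0 then r.tail else r with hbody
    by_cases hb : body = []
    · simp [hb, PySem.List.pyGet?_neg_one, h]
    · have hlast : (sol ++ body).getLast? = body.getLast? :=
        List.getLast?_append_of_ne_nil _ hb
      by_cases h0 : body.getLast? = some 0
      · simp [PySem.List.pyGet?_neg_one, hlast, h0, hb]
      · simp [PySem.List.pyGet?_neg_one, hlast, h0, hb]

theorem pvSeg_append_last (sol r : List Int) (h : sol.getLast? = some 0) :
    (sol ++ pvSeg r).getLast? = some 0 := by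
  rcases pvSeg_last r with he | h0
  · simpa [he] using h
  · rw [List.getLast?_append_of_ne_nil]
    · exact h0
    · intro hc; rw [hc] at h0; simp at h0

theorem pvFoldA_eq (routes : List (List Int)) :
    ∀ sol : List Int, sol.getLast? = some 0 →
      routes.foldl pvStepA sol = sol ++ routes.flatMap pvSeg := by
  induction routes with
  | nil => intro sol _; simp
  | cons r rs ih =>
    intro sol h
    simp only [List.foldl_cons, List.flatMap_cons]
    rw [pvStepA_eq sol r h, ih _ (pvSeg_append_last sol r h), List.append_assoc]

-- dropping the last element of a reversed list = reversing the tail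
theorem pvRevDropLast (r : List Int) : r.reverse.dropLast = r.tail.reverse := by
  cases r with
  | nil => simp
  | cons a as => simp

-- B's step appends exactly the reversed segment
theorem pvStepB_eq (out r : List Int) : pvStepB out r = out ++ (pvSeg r).reverse := by
  unfold pvStepB pvSeg
  simp only [PySem.List.slice?_none_none_neg_one, Option.getD_some,
    PySem.List.pyGet?_neg_one, PySem.List.slice_to_neg_one, List.getLast?_reverse,
    pvRevDropLast, PySem.List.pyGet?_zero]
  by_cases hr : r = []
  · simp [hr]
  · have hrev : r.reverse ≠ [] := by simp [hr]
    by_cases hh : r.head? = some 0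
    · by_cases hb : r.tail = []
      · simp [hr, hh, hrev, hb]
      · have hbrev : r.tail.reverse ≠ [] := by simpa using hb
        by_cases h0 : r.tail.getLast? = some 0
        · simp [hr, hh, hrev, hb, hbrev, h0, pvGetZero, List.head?_reverse]
        · simp [hr, hh, hrev, hb, hbrev, h0, pvGetZero, List.head?_reverse, List.reverse_append]
    · by_cases h0 : r.getLast? = some 0
      · simp [hr, hh, hrev, h0, pvGetZero, List.head?_reverse]
      · simp [hr, hh, hrev, h0, pvGetZero, List.head?_reverse, List.reverse_append]

theorem pvFoldB_eq (l : List (List Int)) :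
    ∀ out : List Int, l.foldl pvStepB out = out ++ l.flatMap (fun r => (pvSeg r).reverse) := by
  induction l with
  | nil => intro out; simp
  | cons r rs ih =>
    intro out
    simp only [List.foldl_cons, List.flatMap_cons]
    rw [pvStepB_eq, ih, List.append_assoc]

-- ===== VERDICT (by name: the statement is the Claim_ definition above) =====
theorem routes2sol_spec : Claim_equal_routes2sol := by
  intro routes _
  unfold Spec_routes2sol routes2sol routes2sol_alt
  by_cases h : routes = []
  · simp [h]
  · simp only [h, if_false]
    rw [pvFoldA_eq routes [0] (by simp), pvFoldB_eq]
    simp [List.reverse_append, List.flatMap_reverse, Function.comp_def]
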